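-- pv_equiv track=rewrite | github.com/bjoernengelmann/InteractiveTableRetrieval | utils_rf.py | debuplicate_header
-- ===== SOURCE A (Python) =====
-- def debuplicate_header(cols):
--     header_list = cols
--     counts = {x: header_list.count(x) for x in header_list}
--     for i in range(len(header_list)-1, -1, -1):
--         if counts[header_list[i]] > 1:
--             current_key = header_list[i]
--             header_list[i] = header_list[i]+str(counts[header_list[i]])
--             counts[current_key] -=1
--
--     return header_list
-- ===== SOURCE B (Python) =====
-- def debuplicate_header(cols):
--     seen = {}
--     for i, name in enumerate(cols):
--         c = seen.get(name, 0) + 1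
--         seen[name] = c
--         if c >= 2:
--             cols[i] = name + str(c)
--     return cols
-- ===== Notes on version B (the rewrite author's own statement) =====
-- stated objective: faster
-- what changed: Replaced A's precomputed full-count table (n list.count scans) and backward renaming loop with reverse-decremented counters by a single forward pass keeping an incremental 'seen' counter, renaming an element as soon as its running count reaches 2.
import Mathlib
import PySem

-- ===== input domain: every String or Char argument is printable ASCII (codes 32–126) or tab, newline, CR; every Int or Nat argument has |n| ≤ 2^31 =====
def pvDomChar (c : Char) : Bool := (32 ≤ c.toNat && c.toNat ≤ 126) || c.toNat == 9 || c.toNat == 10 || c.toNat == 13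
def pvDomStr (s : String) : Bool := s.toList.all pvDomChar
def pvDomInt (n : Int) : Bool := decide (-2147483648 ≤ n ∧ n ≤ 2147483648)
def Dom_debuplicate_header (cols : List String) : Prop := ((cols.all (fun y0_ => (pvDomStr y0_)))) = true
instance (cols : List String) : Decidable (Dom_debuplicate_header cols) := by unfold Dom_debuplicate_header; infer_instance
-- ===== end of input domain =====

-- B replaces A's precomputed counts table (n list.count scans) and backward decrement loop
-- by one forward pass with an incremental 'seen' counter (objective: faster; the timing
-- run measured B faster). Both A and B mutate the input list in place in Python; the
-- equivalence proved here is about the RETURN value.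

-- ===== PORT A =====
-- literal transliteration of A: counts = {x: cols.count(x) for x in cols}; then the
-- backward loop over range(len-1, -1, -1) renaming and decrementing.
-- the body of A's for-loop (one iteration at index i on state (header_list, counts))
def dedupStepA (st : List String × PySem.Dict String Int) (i : Int) :
    List String × PySem.Dict String Int :=
  let name := PySem.List.pyGetD st.1 i ""
  if st.2.getD name 0 > 1 then
    (PySem.List.pySetD st.1 i (name ++ PySem.Int.toStr (st.2.getD name 0)),
     st.2.insert name (st.2.getD name 0 - 1))
  else st
def debuplicate_header (cols : List String) : List String :=
  let counts : PySem.Dict String Int :=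
    cols.foldl (fun d x => d.insert x ((PySem.List.count cols x : Int))) PySem.Dict.empty
  let st :=
    (PySem.List.pyRange ((cols.length : Int) - 1) (-1) (-1)).foldl
      dedupStepA
      (cols, counts)
  st.1

-- ===== PORT B =====
-- transliteration of Source B's single forward pass: 'seen' starts empty, each element is
-- read, its running count incremented, and the element rewritten iff the count is ≥ 2.
-- Source B writes the new value back at index i while iterating forward; since each step
-- touches only the element it is visiting, that in-place write is ported as emitting
-- the (possibly renamed) element into the output being built (the index is not used
-- otherwise), which is exact for the returned list.
def debuplicate_header_alt (cols : List String) : List String :=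
  (cols.foldl
    (fun (st : List String × PySem.Dict String Int) name =>
      let c := st.2.getD name 0 + 1
      if c ≥ 2 then (st.1 ++ [name ++ PySem.Int.toStr c], st.2.insert name c)
      else (st.1 ++ [name], st.2.insert name c))
    ([], PySem.Dict.empty)).1

-- ===== PRECONDITION & SPEC =====
def Spec_debuplicate_header (cols : List String) (out : List String) : Prop := out = debuplicate_header_alt cols
instance (cols : List String) (out : List String) : Decidable (Spec_debuplicate_header cols out) := by unfold Spec_debuplicate_header; infer_instance

-- ===== CLAIM (what is proved, stated in full; the proofs are below) =====
def Claim_equal_debuplicate_header : Prop := ∀ (cols : List String), Dom_debuplicate_header cols → Spec_debuplicate_header cols (debuplicate_header cols)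

-- ===== LEMMAS AND PROOFS =====

-- the common mathematical value: element-wise, with p the already-seen prefix,
-- an element whose running count c (including itself) is ≥ 2 becomes name ++ str c.
def dedupSpec (p : List String) : List String → List String
  | [] => []
  | name :: rest =>
      (if ((p.count name : Int) + 1) ≥ 2 then name ++ PySem.Int.toStr ((p.count name : Int) + 1) else name)
        :: dedupSpec (p ++ [name]) rest

-- the dict comprehension {x: l.count(x) for x in l}: lookup of any s occurring in l
lemma getD_foldl_insert_const {κ ν : Type} [BEq κ] [LawfulBEq κ] [DecidableEq κ]
    (l : List κ) (f : κ → ν) (d : PySem.Dict κ ν) (s : κ) (d0 : ν) :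
    (l.foldl (fun d x => d.insert x (f x)) d).getD s d0
      = if s ∈ l then f s else d.getD s d0 := by
  induction l generalizing d with
  | nil => simp
  | cons x l ih =>
      simp only [List.foldl_cons, ih, PySem.Dict.getD_insert, List.mem_cons]
      by_cases hl : s ∈ l <;> by_cases hx : s = x <;> simp [hl, hx]

-- B's forward loop
lemma B_loop (rest : List String) (p acc : List String) (seen : PySem.Dict String Int)
    (hc : ∀ s, seen.getD s 0 = (p.count s : Int)) :
    (rest.foldl
      (fun (st : List String × PySem.Dict String Int) name =>
        let c := st.2.getD name 0 + 1
        if c ≥ 2 then (st.1 ++ [name ++ PySem.Int.toStr c], st.2.insert name c)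
        else (st.1 ++ [name], st.2.insert name c))
      (acc, seen)).1 = acc ++ dedupSpec p rest := by
  induction rest generalizing p acc seen with
  | nil => simp [dedupSpec]
  | cons name rest ih =>
      have hca : ∀ s, (seen.insert name ((p.count name : Int) + 1)).getD s 0
          = ((p ++ [name]).count s : Int) := by
        intro s
        rw [PySem.Dict.getD_insert]
        by_cases h : s = name <;>
          simp [h, Ne.symm, hc, List.count_append]
      simp only [List.foldl_cons, hc name, dedupSpec]
      by_cases h2 : ((p.count name : Int) + 1) ≥ 2
      · rw [if_pos h2, if_pos h2]
        rw [ih (p ++ [name]) _ _ hca]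
        simp
      · rw [if_neg h2, if_neg h2]
        rw [ih (p ++ [name]) _ _ hca]
        simp

-- A's backward loop: entering the loop with indices j-1 … 0 still to process,
-- the list already holds the final suffix and counts agrees with the j-prefix counts
-- on every name that occurs in that prefix.
lemma A_loop (cols : List String) (j : Nat) (hj : j ≤ cols.length)
    (counts : PySem.Dict String Int)
    (hc : ∀ s, 1 ≤ (cols.take j).count s → counts.getD s 0 = ((cols.take j).count s : Int)) :
    ((PySem.List.pyRange ((j : Int) - 1) (-1) (-1)).foldl
      dedupStepA
      (cols.take j ++ dedupSpec (cols.take j) (cols.drop j), counts)).1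
    = dedupSpec [] cols := by
  induction j generalizing counts with
  | zero =>
      rw [PySem.List.pyRange_neg_one_eq_nil (by norm_num)]
      simp
  | succ j ih =>
      have hjl : j < cols.length := hj
      have hj' : j ≤ cols.length := Nat.le_of_succ_le hj
      have hcast : ((j + 1 : Nat) : Int) - 1 = ((j : Nat) : Int) := by push_cast; ring
      rw [hcast, PySem.List.pyRange_neg_one_cons (by omega), List.foldl_cons]
      have htake : cols.take (j+1) = cols.take j ++ [cols[j]] := by
        rw [List.take_add_one]
        simp [List.getElem?_eq_getElem hjl]
      have hlen1 : (cols.take (j+1)).length = j + 1 := by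
        simp [List.length_take]; omega
      have hlenj : (cols.take j).length = j := by
        simp [List.length_take]; omega
      have hname : ∀ tail : List String,
          PySem.List.pyGetD (cols.take (j+1) ++ tail) ((j : Nat) : Int) "" = cols[j] := by
        intro tail
        rw [PySem.List.pyGetD_natCast, List.getD_eq_getElem?_getD, List.getElem?_append]
        rw [if_pos (by omega)]
        rw [List.getElem?_eq_getElem (by omega)]
        simp [List.getElem_take]
      have hcnt1 : (cols.take (j+1)).count cols[j] = (cols.take j).count cols[j] + 1 := by
        rw [htake, List.count_append, List.count_singleton]
        simp
      have hcounts : counts.getD cols[j] 0 = ((cols.take j).count cols[j] : Int) + 1 := by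
        have := hc cols[j] (by omega)
        rw [this, hcnt1]; push_cast; ring
      have hdrop : cols.drop j = cols[j] :: cols.drop (j+1) := List.drop_eq_getElem_cons hjl
      by_cases h1 : 1 ≤ (cols.take j).count cols[j]
      · -- the element is a repeat: A renames it
        have hstep :
            dedupStepA
              (cols.take (j+1) ++ dedupSpec (cols.take (j+1)) (cols.drop (j+1)), counts)
              ((j : Nat) : Int)
            = (cols.take j ++ dedupSpec (cols.take j) (cols.drop j),
               counts.insert cols[j] (((cols.take j).count cols[j] : Int))) := by
          unfold dedupStepA
          simp only [hname, hcounts]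
          rw [if_pos (by omega)]
          refine Prod.ext ?_ (by simp)
          show PySem.List.pySetD _ _ _ = _
          rw [PySem.List.pySetD_natCast, List.set_append, if_pos (by omega)]
          conv_lhs => rw [htake]
          rw [List.set_append, if_neg (by omega), hlenj]
          simp only [Nat.sub_self, List.set_cons_zero]
          rw [hdrop]
          show _ = cols.take j ++ (_ :: dedupSpec (cols.take j ++ [cols[j]]) (cols.drop (j+1)))
          rw [if_pos (by omega), ← htake]
          simp
        rw [hstep]
        refine ih hj' _ ?_
        intro s hs
        rw [PySem.Dict.getD_insert]
        by_cases hsx : s = cols[j]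
        · simp [hsx]
        · rw [if_neg hsx]
          have hcs : (cols.take (j+1)).count s = (cols.take j).count s := by
            rw [htake, List.count_append, List.count_singleton]
            simp [Ne.symm hsx]
          rw [hc s (by omega), hcs]
      · -- first occurrence: A leaves both the list and the dict alone
        have h0 : (cols.take j).count cols[j] = 0 := by omega
        have hstep :
            dedupStepA
              (cols.take (j+1) ++ dedupSpec (cols.take (j+1)) (cols.drop (j+1)), counts)
              ((j : Nat) : Int)
            = (cols.take j ++ dedupSpec (cols.take j) (cols.drop j), counts) := by
          unfold dedupStepA
          simp only [hname, hcounts, h0]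
          rw [if_neg (by norm_num)]
          refine Prod.ext ?_ rfl
          show cols.take (j+1) ++ dedupSpec (cols.take (j+1)) (cols.drop (j+1)) = _
          rw [hdrop]
          show _ = cols.take j ++ (_ :: dedupSpec (cols.take j ++ [cols[j]]) (cols.drop (j+1)))
          rw [if_neg (by simp [h0])]
          conv_lhs => rw [htake, List.append_assoc, List.singleton_append]
        rw [hstep]
        refine ih hj' _ ?_
        intro s hs
        have hsx : s ≠ cols[j] := fun h => by rw [h] at hs; omega
        have hcs : (cols.take (j+1)).count s = (cols.take j).count s := by
          rw [htake, List.count_append, List.count_singleton]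
          simp [Ne.symm hsx]
        rw [hc s (by omega), hcs]

-- ===== VERDICT (by name: the statement is the Claim_ definition above) =====

theorem debuplicate_header_spec : Claim_equal_debuplicate_header := by
  unfold Claim_equal_debuplicate_header Spec_debuplicate_header
  intro cols _
  have hB : debuplicate_header_alt cols = dedupSpec [] cols := by
    unfold debuplicate_header_alt
    rw [B_loop cols [] [] PySem.Dict.empty (by intro s; simp)]
    simp
  have hA : debuplicate_header cols = dedupSpec [] cols := by
    unfold debuplicate_header
    have hc0 : ∀ s, 1 ≤ (cols.take cols.length).count s →
        (cols.foldl (fun d x => d.insert x ((PySem.List.count cols x : Int))) PySem.Dict.empty).getD s 0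
          = ((cols.take cols.length).count s : Int) := by
      intro s hs
      rw [List.take_length] at hs ⊢
      rw [getD_foldl_insert_const, if_pos (List.count_pos_iff.mp (by omega))]
      rw [PySem.List.count_eq]
    have h := A_loop cols cols.length (le_refl _)
      (cols.foldl (fun d x => d.insert x ((PySem.List.count cols x : Int))) PySem.Dict.empty) hc0
    simp only [List.take_length, List.drop_length, dedupSpec, List.append_nil] at h
    exact h
  rw [hA, hB]
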